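-- pv_equiv track=rewrite | github.com/career-prep/ucp-namer-latam-2026 | Homework_3/q5_FirstKBinary.py | dp_kbinary
-- ===== SOURCE A (Python) =====
-- def dp_kbinary(num):
--     if num==0:
--         return []
--     if num==1:
--         return ["0"]
--
--     dp=["0"]*num
--     dp[0],dp[1]="0","1"
--
--     for i in range(2,num):
--         if i%2==0:
--             dp[i]=dp[i//2]+"0"
--         else:
--             dp[i]=dp[i//2]+"1"
--
--     return dp
-- ===== SOURCE B (Python) =====
-- def dp_kbinary(num):
--     return [format(i, 'b') for i in range(num)]
-- ===== Notes on version B (the rewrite author's own statement) =====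
-- stated objective: idiomatic
-- what changed: Replaces the DP table (dp[i] = dp[i//2] + bit) with an independent per-element base-2 conversion via format(i, 'b') in a comprehension.
import Mathlib
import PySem

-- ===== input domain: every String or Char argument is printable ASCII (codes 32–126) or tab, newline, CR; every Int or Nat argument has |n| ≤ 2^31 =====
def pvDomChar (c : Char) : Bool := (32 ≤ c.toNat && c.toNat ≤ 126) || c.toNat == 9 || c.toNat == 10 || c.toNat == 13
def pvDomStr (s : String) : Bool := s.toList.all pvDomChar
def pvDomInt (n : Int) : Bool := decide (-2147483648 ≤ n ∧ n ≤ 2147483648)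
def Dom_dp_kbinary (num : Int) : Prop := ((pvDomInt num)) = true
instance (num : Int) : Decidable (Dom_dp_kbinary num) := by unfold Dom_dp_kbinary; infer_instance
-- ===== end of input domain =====

-- B replaces A's DP table (dp[i] = dp[i//2] + bit) by an independent per-element
-- base-2 conversion, format(i, 'b'), in a comprehension; equivalence on num ≥ 0.

-- ===== PORT A =====
-- one loop iteration: dp[i] = dp[i//2] + ("0" if i even else "1")
def dpStep (dp : List String) (i : Int) : List String :=
  if PySem.Int.mod i 2 == 0 then
    dp.set i.toNat (PySem.List.pyGetD dp (PySem.Int.floordiv i 2) "" ++ "0")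
  else
    dp.set i.toNat (PySem.List.pyGetD dp (PySem.Int.floordiv i 2) "" ++ "1")

def dp_kbinary (num : Int) : List String :=
  if num == 0 then []
  else if num == 1 then ["0"]
  else
    let dp := List.replicate num.toNat "0"     -- ["0"]*num
    let dp := (dp.set 0 "0").set 1 "1"         -- dp[0],dp[1] = "0","1"
    (PySem.List.pyRange 2 num 1).foldl dpStep dp

-- ===== PORT B =====
-- hand port of format(i, 'b'): exact for n ≥ 0 (all i produced by range(num))
def binStr (n : Nat) : String :=
  if _h : n ≤ 1 then (if n == 0 then "0" else "1")
  else binStr (n / 2) ++ (if n % 2 == 0 then "0" else "1")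
decreasing_by exact Nat.div_lt_self (by omega) (by omega)

def dp_kbinary_alt (num : Int) : List String :=
  (PySem.List.pyRange 0 num 1).map (fun i => binStr i.toNat)

-- ===== PRECONDITION & SPEC =====
-- Pre_ excludes num < 0, where A raises IndexError on the assignment dp[0] = "0" (["0"]*num is []).
def Pre_dp_kbinary (num : Int) : Prop := 0 ≤ num
instance (num : Int) : Decidable (Pre_dp_kbinary num) := by unfold Pre_dp_kbinary; infer_instance
def pvWitness_dp_kbinary : Int := (6)

def Spec_dp_kbinary (num : Int) (out : List String) : Prop := out = dp_kbinary_alt num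
instance (num : Int) (out : List String) : Decidable (Spec_dp_kbinary num out) := by unfold Spec_dp_kbinary; infer_instance

-- ===== CLAIM (what is proved, stated in full; the proofs are below) =====
def Claim_equal_dp_kbinary : Prop := ∀ (num : Int), Dom_dp_kbinary num → Pre_dp_kbinary num → Spec_dp_kbinary num (dp_kbinary num)

-- ===== LEMMAS AND PROOFS =====

-- binStr's recursive equation for n ≥ 2 mirrors A's dp update
lemma binStr_zero : binStr 0 = "0" := by rw [binStr]; rfl
lemma binStr_one : binStr 1 = "1" := by rw [binStr]; rfl

lemma binStr_eq (n : Nat) (h : 2 ≤ n) :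
    binStr n = binStr (n / 2) ++ (if n % 2 == 0 then "0" else "1") := by
  rw [binStr, dif_neg (by omega)]

lemma set_map_range {α : Type} (n k : Nat) (f : Nat → α) (v : α) (hk : k < n) :
    ((List.range n).map f).set k v
      = (List.range n).map (fun j => if j = k then v else f j) := by
  apply List.ext_getElem
  · simp
  · intro i h1 h2
    simp only [List.getElem_set, List.getElem_map, List.getElem_range]
    rcases eq_or_ne i k with h | h
    · subst h; simp
    · simp [h, h.symm]

-- the loop invariant: after processing range(2, k), entries below k hold binStr
lemma loop_inv (n : Nat) (hn : 2 ≤ n) (k : Nat) (hk2 : 2 ≤ k) (hkn : k ≤ n) :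
    (PySem.List.pyRange 2 (k : Int) 1).foldl dpStep
      (((List.replicate n "0").set 0 "0").set 1 "1")
      = (List.range n).map (fun j => if j < k then binStr j else "0") := by
  induction k, hk2 using Nat.le_induction with
  | base =>
      rw [show ((2:Nat):Int) = 2 by norm_num, PySem.List.pyRange_one_eq_nil (by omega)]
      simp only [List.foldl_nil]
      rw [show List.replicate n "0" = (List.range n).map (fun _ => "0") by
            simp [List.map_const'],
          set_map_range n 0 _ _ (by omega), set_map_range n 1 _ _ (by omega)]
      apply List.map_congr_left
      intro j _
      rcases j with _ | _ | j <;> simp [binStr_zero, binStr_one]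
  | succ k hk2 ih =>
      have hkn' : k ≤ n := by omega
      rw [show (((k+1:Nat)):Int) = (k:Int) + 1 by push_cast; ring,
          PySem.List.pyRange_one_succ_right (by exact_mod_cast hk2.trans (by omega)),
          List.foldl_append, ih hkn']
      simp only [List.foldl_cons, List.foldl_nil]
      have hget : PySem.List.pyGetD
          ((List.range n).map (fun j => if j < k then binStr j else "0"))
          (PySem.Int.floordiv (k : Int) 2) ""
          = binStr (k / 2) := by
        rw [show PySem.Int.floordiv (k : Int) 2 = ((k / 2 : Nat) : Int) from
              by exact_mod_cast PySem.Int.floordiv_natCast k 2,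
            PySem.List.pyGetD_natCast]
        have h2 : k / 2 < n := by omega
        have h3 : k / 2 < k := Nat.div_lt_self (by omega) (by omega)
        simp [List.getD, h2, h3]
      have hmod : PySem.Int.mod (k : Int) 2 = ((k % 2 : Nat) : Int) := by
        exact_mod_cast PySem.Int.mod_natCast k 2
      have hset : ∀ v : String,
          ((List.range n).map (fun j => if j < k then binStr j else "0")).set k v
            = (List.range n).map (fun j => if j = k then v else if j < k then binStr j else "0") :=
        fun v => set_map_range n k _ v (by omega)
      have hbin := binStr_eq k hk2
      unfold dpStep
      rw [show ((k:Int)).toNat = k from Int.toNat_natCast k, hget, hmod]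
      by_cases hpar : k % 2 = 0
      · rw [if_pos (by simp [hpar]), hset]
        apply List.map_congr_left; intro j _
        by_cases hj : j = k
        · subst hj; simp [hbin, hpar]
        · by_cases hj' : j < k <;> simp [hj, hj', show j < k + 1 ↔ j ≤ k from by omega,
            show j ≤ k ↔ j < k ∨ j = k from by omega]
      · rw [if_neg (by simp; omega), hset]
        apply List.map_congr_left; intro j _
        by_cases hj : j = k
        · subst hj; simp [hbin, hpar]
        · by_cases hj' : j < k <;> simp [hj, hj', show j < k + 1 ↔ j ≤ k from by omega,
            show j ≤ k ↔ j < k ∨ j = k from by omega]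

lemma alt_eq_map (n : Nat) :
    dp_kbinary_alt (n : Int) = (List.range n).map binStr := by
  unfold dp_kbinary_alt
  rw [PySem.List.pyRange_one]
  simp [List.map_map, Function.comp]

-- ===== VERDICT (by name: the statement is the Claim_ definition above) =====
theorem dp_kbinary_spec : Claim_equal_dp_kbinary := by
  intro num _ hpre
  unfold Spec_dp_kbinary
  obtain ⟨n, rfl⟩ : ∃ n : Nat, num = (n : Int) := ⟨num.toNat, (Int.toNat_of_nonneg hpre).symm⟩
  by_cases h0 : n = 0
  · subst h0
    rw [alt_eq_map]
    simp [dp_kbinary]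
  by_cases h1 : n = 1
  · subst h1
    rw [alt_eq_map]
    simp [dp_kbinary, binStr_zero]
  obtain ⟨m, rfl⟩ : ∃ m, n = m + 2 := ⟨n - 2, by omega⟩
  · have hn : 2 ≤ m + 2 := by omega
    unfold dp_kbinary
    rw [if_neg (by simp; omega), if_neg (by simp; omega)]
    simp only [Int.toNat_natCast]
    rw [loop_inv (m+2) hn (m+2) hn le_rfl, alt_eq_map]
    apply List.map_congr_left
    intro j hj
    simp at hj
    simp [hj]
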